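-- pv_equiv track=rewrite | github.com/ssarunic/thestill | thestill/core/transcript_segmenter.py | _select_balanced_splits
-- ===== SOURCE A (Python) =====
-- from typing import Dict, List, Optional, Tuple
--
-- def _select_balanced_splits(
--     candidates: List[int],
--     total: int,
--     max_chunk: int,
-- ) -> List[int]:
--     """Greedy: pick the earliest candidate that keeps each chunk <= max.
--
--     Walks the candidates in order and picks the one that comes latest
--     without exceeding ``max_chunk`` from the previous split point. This
--     produces chunks that are each near the target size rather than wildly
--     uneven ones. Returns an empty list if no candidate set satisfies the
--     constraint (i.e. every chunk would still be too large).
--     """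
--     if not candidates:
--         return []
--
--     sorted_candidates = sorted(set(candidates))
--     chosen: List[int] = []
--     last_start = 0
--     i = 0
--     n = len(sorted_candidates)
--
--     while last_start + max_chunk < total:
--         # Find the latest candidate within [last_start + 1, last_start + max_chunk].
--         best: Optional[int] = None
--         while i < n and sorted_candidates[i] <= last_start + max_chunk:
--             if sorted_candidates[i] > last_start:
--                 best = sorted_candidates[i]
--             i += 1
--         if best is None:
--             # No candidate within range — this candidate set cannot keep
--             # chunks under the target size. Signal failure to the caller
--             # so it can fall back to the next strategy.
--             return []
--         chosen.append(best)
--         last_start = best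
--
--     return chosen
-- ===== SOURCE B (Python) =====
-- def _bisect_right(a, x):
--     lo, hi = 0, len(a)
--     while lo < hi:
--         mid = (lo + hi) // 2
--         if x < a[mid]:
--             hi = mid
--         else:
--             lo = mid + 1
--     return lo
--
--
-- def _select_balanced_splits(candidates, total, max_chunk):
--     if not candidates:
--         return []
--     sorted_candidates = sorted(set(candidates))
--     chosen = []
--     last_start = 0
--     while last_start + max_chunk < total:
--         pos = _bisect_right(sorted_candidates, last_start + max_chunk)
--         if pos == 0 or sorted_candidates[pos - 1] <= last_start:
--             return []
--         last_start = sorted_candidates[pos - 1]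
--         chosen.append(last_start)
--     return chosen
-- ===== Notes on version B (the rewrite author's own statement) =====
-- stated objective: idiomatic
-- what changed: The persistent forward pointer with its inner linear scan is replaced by a repeated binary search (bisect_right) into the sorted deduplicated candidate list to find the largest candidate not exceeding last_start + max_chunk.
import Mathlib
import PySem

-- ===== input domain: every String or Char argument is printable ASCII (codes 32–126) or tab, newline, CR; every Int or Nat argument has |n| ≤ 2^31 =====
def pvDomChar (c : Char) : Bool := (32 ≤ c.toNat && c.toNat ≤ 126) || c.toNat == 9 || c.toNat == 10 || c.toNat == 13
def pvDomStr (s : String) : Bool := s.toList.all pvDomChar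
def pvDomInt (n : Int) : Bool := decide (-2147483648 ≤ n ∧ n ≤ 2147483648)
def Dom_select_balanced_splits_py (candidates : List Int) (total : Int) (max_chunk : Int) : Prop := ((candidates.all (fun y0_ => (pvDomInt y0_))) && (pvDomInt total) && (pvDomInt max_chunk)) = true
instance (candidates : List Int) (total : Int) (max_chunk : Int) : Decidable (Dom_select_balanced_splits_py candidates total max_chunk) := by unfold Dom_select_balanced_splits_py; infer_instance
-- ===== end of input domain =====

-- B replaces A's persistent forward pointer and inner linear scan by a bisect_right
-- binary search into the sorted deduplicated candidate list (more idiomatic; same cost).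
-- Both while loops are ported with an explicit fuel that is provably adequate
-- (the loop variable strictly increases), so the ports are structural recursions.

-- ===== PORT A =====
-- inner while loop: 'while i < n and sorted_candidates[i] <= last_start + max_chunk: …'
-- fuel ≥ sc.length - i is adequate (i strictly increases, loop exits at i = sc.length)
def pvAInner (sc : List Int) (last_start cap : Int) : Nat → Nat → Option Int → Option Int × Nat
  | 0, i, best => (best, i)
  | fuel + 1, i, best =>
    if h : i < sc.length then
      if sc[i] ≤ cap then
        pvAInner sc last_start cap fuel (i + 1) (if last_start < sc[i] then some sc[i] else best)
      else (best, i)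
    else (best, i)

-- outer while loop: 'while last_start + max_chunk < total: …'
-- fuel ≥ (total - (last_start + max_chunk)).toNat is adequate (last_start strictly increases)
def pvAOuter (sc : List Int) (total max_chunk : Int) : Nat → List Int → Int → Nat → List Int
  | 0, chosen, _, _ => chosen
  | fuel + 1, chosen, last_start, i =>
    if last_start + max_chunk < total then
      match pvAInner sc last_start (last_start + max_chunk) sc.length i none with
      | (none, _) => []
      | (some best, i') => pvAOuter sc total max_chunk fuel (chosen ++ [best]) best i'
    else chosen

def select_balanced_splits_py (candidates : List Int) (total : Int) (max_chunk : Int) : List Int :=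
  if candidates = [] then []
  else
    pvAOuter (PySem.List.sorted (PySem.Set.ofList candidates) (fun x => x)) total max_chunk
      ((total - max_chunk).toNat) [] 0 0

-- ===== PORT B =====
-- hand-written bisect_right of Source B: the classic 'while lo < hi' halving loop
-- (PySem.List.bisectRightLoop is exactly this loop, fuel = len)
def pvBisectRight (a : List Int) (x : Int) : Nat :=
  PySem.List.bisectRightLoop a x a.length 0 a.length

-- outer while loop of B: repeated binary search for the largest candidate ≤ cap;
-- same adequate fuel as A's outer loop
def pvBOuter (sc : List Int) (total max_chunk : Int) : Nat → List Int → Int → List Int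
  | 0, chosen, _ => chosen
  | fuel + 1, chosen, last_start =>
    if last_start + max_chunk < total then
      if pvBisectRight sc (last_start + max_chunk) = 0 then []
      else
        if sc[pvBisectRight sc (last_start + max_chunk) - 1]! ≤ last_start then []
        else
          pvBOuter sc total max_chunk fuel
            (chosen ++ [sc[pvBisectRight sc (last_start + max_chunk) - 1]!])
            (sc[pvBisectRight sc (last_start + max_chunk) - 1]!)
    else chosen

def select_balanced_splits_py_alt (candidates : List Int) (total : Int) (max_chunk : Int) : List Int :=
  if candidates = [] then []
  else
    pvBOuter (PySem.List.sorted (PySem.Set.ofList candidates) (fun x => x)) total max_chunk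
      ((total - max_chunk).toNat) [] 0

-- ===== PRECONDITION & SPEC =====
def Spec_select_balanced_splits_py (candidates : List Int) (total : Int) (max_chunk : Int) (out : List Int) : Prop := out = select_balanced_splits_py_alt candidates total max_chunk
instance (candidates : List Int) (total : Int) (max_chunk : Int) (out : List Int) : Decidable (Spec_select_balanced_splits_py candidates total max_chunk out) := by unfold Spec_select_balanced_splits_py; infer_instance

-- ===== CLAIM (what is proved, stated in full; the proofs are below) =====
def Claim_equal_select_balanced_splits_py : Prop := ∀ (candidates : List Int) (total : Int) (max_chunk : Int), Dom_select_balanced_splits_py candidates total max_chunk → Spec_select_balanced_splits_py candidates total max_chunk (select_balanced_splits_py candidates total max_chunk)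

-- ===== LEMMAS AND PROOFS =====

-- pvBisectRight is PySem's bisectRight
theorem pvBisectRight_eq (a : List Int) (x : Int) :
    pvBisectRight a x = PySem.List.bisectRight a x := rfl

-- A's inner scan finds nothing when every candidate within the cap is ≤ last_start
theorem pvAInner_none (sc : List Int) (ls cap : Int)
    (hnone : ∀ j (h : j < sc.length), sc[j] ≤ cap → sc[j] ≤ ls) :
    ∀ (fuel i : Nat), (pvAInner sc ls cap fuel i none).1 = none := by
  intro fuel
  induction fuel with
  | zero => intro i; rfl
  | succ fuel ih =>
    intro i
    unfold pvAInner
    by_cases hi : i < sc.length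
    · by_cases hc : sc[i] ≤ cap
      · have hle : sc[i] ≤ ls := hnone i hi hc
        have hnl : ¬ ls < sc[i] := by omega
        simp only [hi, dite_true, hc, if_true, hnl, if_false]
        exact ih (i + 1)
      · simp [hi, hc]
    · simp [hi]

-- A's inner scan returns the largest candidate ≤ cap when it exceeds last_start
theorem pvAInner_some (sc : List Int) (ls cap : Int) (pos : Nat)
    (hpos : pos ≤ sc.length) (hp0 : 0 < pos)
    (hle : ∀ j (h : j < sc.length), j < pos → sc[j] ≤ cap)
    (hgt : ∀ j (h : j < sc.length), pos ≤ j → cap < sc[j])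
    (hbest : ls < sc[pos - 1]'(by omega)) :
    ∀ (fuel i : Nat) (b : Option Int), sc.length - i ≤ fuel → i < pos →
    pvAInner sc ls cap fuel i b = (some (sc[pos - 1]'(by omega)), pos) := by
  intro fuel
  induction fuel with
  | zero => intro i b hn hi; omega
  | succ fuel ih =>
    intro i b hn hi
    have hilen : i < sc.length := by omega
    have hic : sc[i] ≤ cap := hle i hilen hi
    unfold pvAInner
    simp only [hilen, dite_true, hic, if_true]
    by_cases hlast : i + 1 < pos
    · exact ih (i + 1) _ (by omega) hlast
    · -- i = pos - 1 : the next step exits the loop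
      have hieq : i = pos - 1 := by omega
      subst hieq
      have hls : ls < sc[pos - 1] := hbest
      have hip : pos - 1 + 1 = pos := by omega
      simp only [hls, if_true, hip]
      cases fuel with
      | zero => rfl
      | succ fuel =>
        unfold pvAInner
        by_cases hplen : pos < sc.length
        · have : cap < sc[pos]'hplen := hgt pos hplen (le_refl _)
          have hnc : ¬ (sc[pos]'hplen ≤ cap) := by omega
          simp only [hplen, dite_true, hnc, if_false]
        · simp only [hplen, dite_false]

-- the two outer loops agree, given the strictly sorted list and the pointer invariant:
-- every candidate strictly before index i is ≤ last_start
theorem pvOuter_eq (sc : List Int) (total mc : Int) (hs : sc.Pairwise (· < ·)) :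
    ∀ (fuel : Nat) (ls : Int) (i : Nat) (chosen : List Int),
    (∀ j (h : j < sc.length), j < i → sc[j] ≤ ls) →
    pvAOuter sc total mc fuel chosen ls i = pvBOuter sc total mc fuel chosen ls := by
  have hmono : ∀ (a b : Nat) (ha : a < sc.length) (hb : b < sc.length), a < b → sc[a] < sc[b] := by
    intro a b ha hb hab
    exact List.pairwise_iff_getElem.mp hs a b ha hb hab
  have hsle : sc.Pairwise (· ≤ ·) := hs.imp (fun h => le_of_lt h)
  intro fuel
  induction fuel with
  | zero => intro ls i chosen _; rfl
  | succ fuel ih =>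
    intro ls i chosen hinv
    by_cases hcond : ls + mc < total
    · obtain ⟨hposlen, hle, hgt⟩ := PySem.List.bisectRight_spec sc (ls + mc) hsle
      set pos := PySem.List.bisectRight sc (ls + mc) with hposdef
      have hcap_lt : ∀ j (h : j < sc.length), sc[j] ≤ ls + mc → j < pos := by
        intro j h hj
        by_contra hcon
        have := hgt j h (by omega)
        omega
      rw [pvAOuter.eq_def, pvBOuter.eq_def]
      simp only [hcond, if_true, pvBisectRight_eq, ← hposdef]
      by_cases hp0 : pos = 0
      · -- no candidate ≤ cap at all: both fail with []
        have hnone : (pvAInner sc ls (ls + mc) sc.length i none).1 = none := by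
          apply pvAInner_none
          intro j h hj
          have := hcap_lt j h hj
          omega
        simp only [hp0, if_true]
        rcases hmm : pvAInner sc ls (ls + mc) sc.length i none with ⟨b, i'⟩
        rw [hmm] at hnone
        simp at hnone
        subst hnone
        rfl
      · have hp0' : 0 < pos := Nat.pos_of_ne_zero hp0
        have hplen : pos - 1 < sc.length := by omega
        have hgetb : sc[pos - 1]! = sc[pos - 1]'hplen := getElem!_pos sc (pos - 1) hplen
        by_cases hc : sc[pos - 1]'hplen ≤ ls
        · -- largest candidate within cap does not exceed last_start: both fail with []
          have hnone : (pvAInner sc ls (ls + mc) sc.length i none).1 = none := by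
            apply pvAInner_none
            intro j h hj
            have hjp := hcap_lt j h hj
            by_cases hje : j = pos - 1
            · subst hje; exact hc
            · have := hmono j (pos - 1) h hplen (by omega)
              omega
          simp only [hp0, if_false, hgetb, hc, if_true]
          rcases hmm : pvAInner sc ls (ls + mc) sc.length i none with ⟨b, i'⟩
          rw [hmm] at hnone
          simp at hnone
          subst hnone
          rfl
        · -- both pick sc[pos-1] and continue
          have hlt : ls < sc[pos - 1]'hplen := by omega
          have hipos : i < pos := by
            by_contra hcon
            have := hinv (pos - 1) hplen (by omega)
            omega
          have hsome := pvAInner_some sc ls (ls + mc) pos hposlen hp0'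
            (fun j h hj => hle j h hj) hgt hlt sc.length i none (by omega) hipos
          rw [hsome]
          simp only [hp0, if_false, hgetb, hc, if_false]
          apply ih
          intro j h hj
          by_cases hje : j = pos - 1
          · subst hje; exact le_refl _
          · exact le_of_lt (hmono j (pos - 1) h hplen (by omega))
    · rw [pvAOuter.eq_def, pvBOuter.eq_def]
      simp [hcond]

-- ===== VERDICT (by name: the statement is the Claim_ definition above) =====
theorem select_balanced_splits_py_spec : Claim_equal_select_balanced_splits_py := by
  intro candidates total max_chunk _hdom
  unfold Spec_select_balanced_splits_py select_balanced_splits_py select_balanced_splits_py_alt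
  by_cases hc : candidates = []
  · simp [hc]
  · simp only [hc, if_false]
    exact pvOuter_eq _ total max_chunk
      (PySem.List.sorted_ofList_pairwise_lt candidates)
      ((total - max_chunk).toNat) 0 0 [] (by intro j h hj; omega)
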